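-- pv_equiv track=rewrite | github.com/alse0722/coding_theory | n7/lz77.py | make_turple
-- ===== SOURCE A (Python) =====
-- def make_turple(buffer, next):
--     if len(buffer) == 0:
--         return 0, 0, next[0]
--     if len(next) == 0:
--         return -1, -1, ""
--     length = 0
--     offset = 0
--     tmp_buffer = buffer + next
--     buffer_pointer = len(buffer)
--     for i in range(len(buffer)):
--         tmp_length = 0
--         while tmp_buffer[i + tmp_length] == tmp_buffer[buffer_pointer + tmp_length]:
--             tmp_length += 1
--             if buffer_pointer + tmp_length == len(tmp_buffer):
--                 tmp_length -= 1
--                 break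
--             if i + tmp_length >= buffer_pointer:
--                 break
--         if tmp_length > length:
--             offset = i
--             length = tmp_length
--     return offset, length, tmp_buffer[buffer_pointer + length]
-- ===== SOURCE B (Python) =====
-- def make_turple(buffer, next):
--     if len(buffer) == 0:
--         return 0, 0, next[0]
--     if len(next) == 0:
--         return -1, -1, ""
--     # Binary search for the largest l such that next[:l] occurs inside buffer
--     # (the predicate is monotone in l), then locate its earliest occurrence.
--     lo, hi = 0, min(len(buffer), len(next))
--     while lo < hi:
--         mid = (lo + hi + 1) // 2
--         if next[:mid] in buffer:
--             lo = mid
--         else: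
--             hi = mid - 1
--     if lo == len(next):
--         lo -= 1
--     return buffer.find(next[:lo]), lo, next[lo]
-- ===== Notes on version B (the rewrite author's own statement) =====
-- stated objective: faster
-- what changed: Replaces the per-position character-matching double loop with a binary search over the match length l (the predicate 'next[:l] occurs in buffer' is monotone in l, tested with C-speed substring search), then a single find() for the earliest offset.
-- outside the precondition, e.g. on make_turple('', ''): A raises IndexError, B raises IndexError
import Mathlib
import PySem

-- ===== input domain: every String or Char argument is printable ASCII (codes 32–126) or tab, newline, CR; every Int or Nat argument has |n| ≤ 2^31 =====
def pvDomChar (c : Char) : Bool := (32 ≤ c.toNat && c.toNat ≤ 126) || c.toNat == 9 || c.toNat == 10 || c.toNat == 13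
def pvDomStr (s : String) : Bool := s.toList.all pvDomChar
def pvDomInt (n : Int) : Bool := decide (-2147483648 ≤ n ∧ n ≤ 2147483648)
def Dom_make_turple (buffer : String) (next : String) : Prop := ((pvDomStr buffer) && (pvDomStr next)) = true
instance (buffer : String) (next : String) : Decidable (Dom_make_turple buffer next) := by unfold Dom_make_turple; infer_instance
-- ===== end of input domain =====

-- B replaces A's per-position matching double loop by a binary search over the match
-- length (monotone substring-containment predicate) plus one earliest-occurrence find.


-- ===== PORT A =====
-- A's inner 'while': compares tmp[i+t] with tmp[n+t] and applies A's two break rules.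
-- The bounds guard only makes the recursion total; on A's reachable states the
-- indices are always in range (Python never raises here on A's main path).
-- (structural recursion on a fuel counter that over-counts the loop's iterations;
--  the loop runs at most next-length steps, the call site passes tmp.length fuel)
def aWhile (tmp : List Char) (n i : Nat) : Nat → Nat → Nat
  | 0, t => t
  | d + 1, t =>
    if h : i + t < tmp.length ∧ n + t < tmp.length then
      if tmp[i + t]'h.1 = tmp[n + t]'h.2 then
        if n + (t + 1) = tmp.length then t
        else if n ≤ i + (t + 1) then t + 1
        else aWhile tmp n i d (t + 1)
      else t
    else t

def make_turple (buffer : String) (next : String) : Int × Int × String :=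
  let b := buffer.toList
  let nx := next.toList
  if b.length = 0 then (0, 0, String.ofList (nx.take 1))       -- next[0] (raises if next = "", excluded by Pre_)
  else if nx.length = 0 then (-1, -1, "")
  else
    let tmp := b ++ nx
    let n := b.length
    let p := (List.range n).foldl
      (fun (acc : Nat × Nat) i =>
        let t := aWhile tmp n i tmp.length 0
        if acc.2 < t then (i, t) else acc) (0, 0)          -- acc = (offset, length); 'tmp_length > length'
    ((p.1 : Int), (p.2 : Int), String.ofList ((tmp.drop (n + p.2)).take 1))   -- tmp_buffer[buffer_pointer + length]

-- ===== PORT B =====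
-- B's binary search: largest l in [lo, hi] with next[:l] a substring of buffer
-- ('(lo + hi + 1) // 2' on nonnegative ints is Nat division).
-- (structural recursion on a fuel counter that over-counts the halvings;
--  hi - lo shrinks each step, the call site passes hi - lo + 1 fuel)
def bsearch (b nx : List Char) : Nat → Nat → Nat → Nat
  | 0, lo, _ => lo
  | d + 1, lo, hi =>
    if lo < hi then
      if PySem.Chars.isIn (nx.take ((lo + hi + 1) / 2)) b then
        bsearch b nx d ((lo + hi + 1) / 2) hi
      else
        bsearch b nx d lo ((lo + hi + 1) / 2 - 1)
    else lo

def make_turple_alt (buffer : String) (next : String) : Int × Int × String :=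
  let b := buffer.toList
  let nx := next.toList
  if b.length = 0 then (0, 0, String.ofList (nx.take 1))       -- next[0]
  else if nx.length = 0 then (-1, -1, "")
  else
    let l0 := bsearch b nx (min b.length nx.length + 1) 0 (min b.length nx.length)
    let l := if l0 = nx.length then l0 - 1 else l0
    (PySem.Chars.find b (nx.take l), (l : Int), String.ofList ((nx.drop l).take 1))   -- buffer.find(next[:l]), l, next[l]

-- ===== PRECONDITION & SPEC =====
-- Pre_ excludes exactly ("", ""): there A evaluates next[0] on the empty string and raises IndexError.
def Pre_make_turple (buffer : String) (next : String) : Prop := ¬ (buffer = "" ∧ next = "")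
instance (buffer : String) (next : String) : Decidable (Pre_make_turple buffer next) := by
  unfold Pre_make_turple; infer_instance
def pvWitness_make_turple : String × String := ("abab", "aba")
def Spec_make_turple (buffer : String) (next : String) (out : Int × Int × String) : Prop := out = make_turple_alt buffer next
instance (buffer : String) (next : String) (out : Int × Int × String) : Decidable (Spec_make_turple buffer next out) := by unfold Spec_make_turple; infer_instance

-- ===== CLAIM (what is proved, stated in full; the proofs are below) =====
def Claim_equal_make_turple : Prop := ∀ (buffer : String) (next : String), Dom_make_turple buffer next → Pre_make_turple buffer next → Spec_make_turple buffer next (make_turple buffer next)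

-- ===== LEMMAS AND PROOFS =====

/-- Longest common prefix length of two character lists. -/
def lcp : List Char → List Char → Nat
  | a :: x, c :: y => if a = c then lcp x y + 1 else 0
  | _, _ => 0

lemma lcp_le_left (x y : List Char) : lcp x y ≤ x.length := by
  induction x generalizing y with
  | nil => cases y <;> simp [lcp]
  | cons a x ih =>
    cases y with
    | nil => simp [lcp]
    | cons c y =>
      by_cases h : a = c
      · simp only [lcp, if_pos h, List.length_cons]
        have := ih y; omega
      · simp [lcp, h]

lemma lcp_le_right (x y : List Char) : lcp x y ≤ y.length := by
  induction x generalizing y with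
  | nil => cases y <;> simp [lcp]
  | cons a x ih =>
    cases y with
    | nil => simp [lcp]
    | cons c y =>
      by_cases h : a = c
      · simp only [lcp, if_pos h, List.length_cons]
        have := ih y; omega
      · simp [lcp, h]

lemma lcp_agree (x y : List Char) (t : Nat) (ht : t < lcp x y)
    (hx : t < x.length) (hy : t < y.length) : x[t] = y[t] := by
  induction x generalizing y t with
  | nil => simp at hx
  | cons a x ih =>
    cases y with
    | nil => simp at hy
    | cons c y =>
      by_cases h : a = c
      · cases t with
        | zero => simpa using h
        | succ t =>
          simp only [List.getElem_cons_succ]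
          exact ih y t (by simp [lcp, h] at ht; omega) (by simpa using hx) (by simpa using hy)
      · simp [lcp, h] at ht
lemma lcp_ne (x y : List Char) (hx : lcp x y < x.length) (hy : lcp x y < y.length) :
    x[lcp x y]'hx ≠ y[lcp x y]'hy := by
  induction x generalizing y with
  | nil => simp at hx
  | cons a x ih =>
    cases y with
    | nil => simp at hy
    | cons c y =>
      by_cases h : a = c
      · have e : lcp (a :: x) (c :: y) = lcp x y + 1 := by simp [lcp, h]
        intro hcon
        have hx' : lcp x y < x.length := by simp [e] at hx; omega
        have hy' : lcp x y < y.length := by simp [e] at hy; omega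
        apply ih y hx' hy'
        simpa [e] using hcon
      · have e : lcp (a :: x) (c :: y) = 0 := by simp [lcp, h]
        simpa [e] using h

/-- `y.take l` is a prefix of `x` iff the first `l` characters agree (for `l ≤ y.length`). -/
lemma take_prefix_iff (x y : List Char) (l : Nat) (hl : l ≤ y.length) :
    y.take l <+: x ↔ l ≤ lcp x y := by
  induction x generalizing y l with
  | nil =>
    cases l with
    | zero => simp
    | succ l =>
      cases y with
      | nil => simp at hl
      | cons c y => simp [lcp]
  | cons a x ih =>
    cases l with
    | zero => simp
    | succ l =>
      cases y with
      | nil => simp at hl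
      | cons c y =>
        simp only [List.take_succ_cons, List.cons_prefix_cons]
        by_cases h : a = c
        · simp only [lcp, if_pos h]
          constructor
          · rintro ⟨h1, h2⟩
            have := (ih y l (by simpa using hl)).mp h2
            omega
          · intro hle
            exact ⟨h.symm, (ih y l (by simpa using hl)).mpr (by omega)⟩
        · simp only [lcp, if_neg h]
          constructor
          · rintro ⟨h1, _⟩; exact absurd h1.symm h
          · omega

/-- Match length of A at position `i`. -/
def rr (b nx : List Char) (i : Nat) : Nat := lcp (b.drop i) nx

/-- The value A's inner while loop records for position `i` (with its two break quirks). -/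
def LL (b nx : List Char) (i : Nat) : Nat :=
  if rr b nx i = nx.length then nx.length - 1 else rr b nx i

lemma rr_le_sub (b nx : List Char) (i : Nat) : rr b nx i ≤ b.length - i := by
  simpa using lcp_le_left (b.drop i) nx

lemma rr_le_right (b nx : List Char) (i : Nat) : rr b nx i ≤ nx.length := lcp_le_right _ _

lemma aWhile_eq_aux (b nx : List Char) (i : Nat) :
    ∀ d t, nx.length - t ≤ d → t ≤ rr b nx i → t < nx.length → i + t < b.length →
      ∀ fuel, d < fuel → aWhile (b ++ nx) b.length i fuel t = LL b nx i := by
  intro d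
  induction d with
  | zero => intro t h1 _ h3 _ fuel _; omega
  | succ d ih =>
    intro t h1 ht htm hin fuel hfuel
    obtain ⟨fuel, rfl⟩ : ∃ f, fuel = f + 1 := ⟨fuel - 1, by omega⟩
    have hlen : (b ++ nx).length = b.length + nx.length := by simp
    have hit : i + t < (b ++ nx).length := by omega
    have hnt : b.length + t < (b ++ nx).length := by omega
    have eL : (b ++ nx)[i + t]'hit = (b.drop i)[t]'(by simp; omega) := by
      rw [List.getElem_append_left (by omega)]
      rw [List.getElem_drop]
    have eR : (b ++ nx)[b.length + t]'hnt = nx[t]'htm := by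
      rw [List.getElem_append_right (by omega)]
      congr 1
      omega
    rw [aWhile, dif_pos ⟨hit, hnt⟩]

    rcases Nat.lt_or_eq_of_le ht with hlt | heq
    · -- t < rr: the characters agree
      have heqc : (b ++ nx)[i + t]'hit = (b ++ nx)[b.length + t]'hnt := by
        rw [eL, eR]
        exact lcp_agree (b.drop i) nx t hlt (by simp; omega) htm
      rw [if_pos heqc]
      by_cases h2 : b.length + (t + 1) = (b ++ nx).length
      · -- t + 1 = m : full next matched, record m - 1
        rw [if_pos h2]
        have hm : t + 1 = nx.length := by omega
        have hfull : rr b nx i = nx.length := le_antisymm (rr_le_right b nx i) (by omega)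
        unfold LL
        rw [if_pos hfull]
        omega
      · rw [if_neg h2]
        by_cases h3 : b.length ≤ i + (t + 1)
        · -- hit the end of buffer: record t + 1
          rw [if_pos h3]
          have h4 : rr b nx i ≤ b.length - i := rr_le_sub b nx i
          have h5 : rr b nx i = t + 1 := by omega
          have h6 : rr b nx i ≠ nx.length := by omega
          unfold LL
          rw [if_neg h6]
          omega
        · rw [if_neg h3]
          exact ih (t + 1) (by omega) (by omega) (by omega) (by omega) fuel (by omega)
    · -- t = rr: mismatch, record t
      have hrr : lcp (List.drop i b) nx = t := by unfold rr at heq; omega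
      have hne : (b ++ nx)[i + t]'hit ≠ (b ++ nx)[b.length + t]'hnt := by
        rw [eL, eR]
        have hxa : lcp (List.drop i b) nx < (List.drop i b).length := by simp; omega
        have hxb : lcp (List.drop i b) nx < nx.length := by omega
        simpa [hrr] using lcp_ne (List.drop i b) nx hxa hxb
      rw [if_neg hne]
      have h6 : rr b nx i ≠ nx.length := by omega
      unfold LL
      rw [if_neg h6]
      omega

lemma aWhile_eq (b nx : List Char) (i : Nat) (hm : nx.length ≠ 0) (hi : i < b.length) :
    aWhile (b ++ nx) b.length i (b ++ nx).length 0 = LL b nx i :=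
  aWhile_eq_aux b nx i nx.length 0 (by omega) (Nat.zero_le _) (by omega) (by omega)
    (b ++ nx).length (by simp; omega)

/-- Running maximum of `L` over `range n`. -/
def maxL (L : Nat → Nat) (n : Nat) : Nat :=
  (List.range n).foldl (fun a i => max a (L i)) 0

lemma maxL_succ (L : Nat → Nat) (n : Nat) : maxL L (n + 1) = max (maxL L n) (L n) := by
  simp [maxL, List.range_succ]

lemma maxL_ge (L : Nat → Nat) (n : Nat) : ∀ j < n, L j ≤ maxL L n := by
  induction n with
  | zero => omega
  | succ n ih =>
    intro j hj
    rw [maxL_succ]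
    rcases Nat.lt_or_ge j n with h | h
    · exact le_trans (ih j h) (Nat.le_max_left _ _)
    · have : j = n := by omega
      subst this
      exact Nat.le_max_right _ _

lemma maxL_le (L : Nat → Nat) (n c : Nat) (h : ∀ j < n, L j ≤ c) : maxL L n ≤ c := by
  induction n with
  | zero => simp [maxL]
  | succ n ih =>
    rw [maxL_succ]
    exact max_le (ih (fun j hj => h j (by omega))) (h n (by omega))

lemma maxL_attained (L : Nat → Nat) (n : Nat) :
    maxL L n = 0 ∨ ∃ i < n, L i = maxL L n := by
  induction n with
  | zero => left; simp [maxL]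
  | succ n ih =>
    rw [maxL_succ]
    by_cases h : L n ≤ maxL L n
    · rw [max_eq_left h]
      rcases ih with h0 | ⟨i, hi, he⟩
      · exact Or.inl h0
      · exact Or.inr ⟨i, by omega, he⟩
    · rw [max_eq_right (by omega)]
      exact Or.inr ⟨n, by omega, rfl⟩

lemma maxL_congr (L L' : Nat → Nat) (n : Nat) (h : ∀ j < n, L j = L' j) :
    maxL L n = maxL L' n := by
  induction n with
  | zero => rfl
  | succ n ih =>
    rw [maxL_succ, maxL_succ, ih (fun j hj => h j (by omega)), h n (by omega)]

/-- A's outer fold keeps the first position attaining the running maximum. -/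
lemma fold_spec (L : Nat → Nat) (n : Nat) :
    let p := (List.range n).foldl
      (fun (acc : Nat × Nat) i => if acc.2 < L i then (i, L i) else acc) (0, 0)
    p.2 = maxL L n ∧ p.2 ≤ L p.1 ∧ ∀ j < p.1, L j < p.2 := by
  induction n with
  | zero =>
    simp only [List.range_zero, List.foldl_nil]
    exact ⟨rfl, Nat.zero_le _, by omega⟩
  | succ n ih =>
    simp only [List.range_succ, List.foldl_append, List.foldl_cons, List.foldl_nil]
    obtain ⟨ih1, ih2, ih3⟩ := ih
    set q := (List.range n).foldl
      (fun (acc : Nat × Nat) i => if acc.2 < L i then (i, L i) else acc) (0, 0) with hq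
    rw [maxL_succ]
    by_cases h : q.2 < L n
    · rw [if_pos h]
      refine ⟨?_, le_refl _, ?_⟩
      · show L n = max (maxL L n) (L n)
        rw [max_eq_right (by omega)]
      · intro j hj
        have hj' : j < n := hj
        exact lt_of_le_of_lt (by rw [ih1]; exact maxL_ge L n j hj') h
    · rw [if_neg h]
      exact ⟨by omega, ih2, ih3⟩

/-- The containment predicate B binary-searches over. -/
def PP (b nx : List Char) (l : Nat) : Prop := PySem.Chars.isIn (nx.take l) b = true

lemma PP_mono (b nx : List Char) (k l : Nat) (hkl : k ≤ l) (h : PP b nx l) : PP b nx k := by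
  unfold PP at *
  rw [PySem.Chars.isIn_iff_infix] at *
  have hpre : nx.take k <+: nx.take l := by
    rw [List.prefix_take_iff]
    exact ⟨List.take_prefix _ _, by simp; omega⟩
  exact hpre.isInfix.trans h

lemma PP_iff_exists (b nx : List Char) (l : Nat) (hl : l ≤ nx.length) :
    PP b nx l ↔ ∃ j, l ≤ rr b nx j := by
  unfold PP
  rw [← PySem.Chars.exists_prefix_drop_iff_isIn]
  constructor
  · rintro ⟨j, hj⟩; exact ⟨j, (take_prefix_iff _ _ _ hl).mp hj⟩
  · rintro ⟨j, hj⟩; exact ⟨j, (take_prefix_iff _ _ _ hl).mpr hj⟩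

lemma bsearch_spec (b nx : List Char) (K : Nat) :
    ∀ d lo hi, hi - lo ≤ d → PP b nx lo → lo ≤ hi → hi ≤ K →
      (∀ l, l ≤ K → PP b nx l → l ≤ hi) →
      PP b nx (bsearch b nx d lo hi) ∧ bsearch b nx d lo hi ≤ K ∧
        ∀ l, l ≤ K → PP b nx l → l ≤ bsearch b nx d lo hi := by
  intro d
  induction d with
  | zero =>
    intro lo hi h1 h2 h3 h4 h5
    have : lo = hi := by omega
    subst this
    exact ⟨h2, h4, h5⟩
  | succ d ih =>
    intro lo hi h1 h2 h3 h4 h5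
    by_cases hlt : lo < hi
    · rw [bsearch, if_pos hlt]
      by_cases hp : PP b nx ((lo + hi + 1) / 2)
      · rw [if_pos (by exact hp)]
        exact ih ((lo + hi + 1) / 2) hi (by omega) hp (by omega) h4 h5
      · rw [if_neg (by simpa [PP] using hp)]
        refine ih lo ((lo + hi + 1) / 2 - 1) (by omega) h2 (by omega) (by omega) ?_
        intro l hl hPl
        by_contra hcon
        exact hp (PP_mono b nx _ l (by omega) hPl)
    · rw [bsearch, if_neg hlt]
      exact ⟨h2, by omega, fun l hl hPl => le_trans (h5 l hl hPl) (by omega)⟩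

/-- `bsearch` from `[0, min n m]` computes the maximum of `rr` over `range n`. -/
lemma bsearch_eq_maxR (b nx : List Char) :
    bsearch b nx (min b.length nx.length + 1) 0 (min b.length nx.length)
      = maxL (rr b nx) b.length := by
  set K := min b.length nx.length with hK
  set R := maxL (rr b nx) b.length with hR
  have hP0 : PP b nx 0 := by
    unfold PP
    simp [PySem.Chars.isIn_nil b]
  obtain ⟨hres1, hres2, hres3⟩ :=
    bsearch_spec b nx K (K + 1) 0 K (by omega) hP0 (Nat.zero_le _) (le_refl _)
      (fun l hl _ => hl)
  set res := bsearch b nx (K + 1) 0 K with hres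
  -- R ≤ K
  have hRK : R ≤ K := by
    apply maxL_le
    intro j hj
    have := rr_le_sub b nx j
    have := rr_le_right b nx j
    omega
  -- res ≤ R
  have h1 : res ≤ R := by
    have hresm : res ≤ nx.length := by omega
    obtain ⟨j, hj⟩ := (PP_iff_exists b nx res hresm).mp hres1
    rcases Nat.lt_or_ge j b.length with hjn | hjn
    · exact le_trans hj (maxL_ge _ _ j hjn)
    · have : b.drop j = [] := List.drop_eq_nil_of_le hjn
      have : rr b nx j = 0 := by simp [rr, this, lcp]
      omega
  -- R ≤ res
  have h2 : R ≤ res := by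
    apply hres3 R hRK
    rcases maxL_attained (rr b nx) b.length with h0 | ⟨i, hi, he⟩
    · rw [← hR] at h0
      rw [h0]
      exact hP0
    · rw [PP_iff_exists b nx R (by have := rr_le_right b nx i; omega)]
      exact ⟨i, by omega⟩
  omega

/-- `LL j ≥ c ↔ rr j ≥ c` for thresholds `c ≤ m - 1`. -/
lemma LL_ge_iff (b nx : List Char) (j c : Nat) (hc : c ≤ nx.length - 1) :
    c ≤ LL b nx j ↔ c ≤ rr b nx j := by
  unfold LL
  by_cases h : rr b nx j = nx.length
  · rw [if_pos h]; omega
  · rw [if_neg h]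

-- ===== VERDICT (by name: the statement is the Claim_ definition above) =====
theorem make_turple_spec : Claim_equal_make_turple := by
  intro buffer next _ _
  unfold Spec_make_turple make_turple make_turple_alt
  set b := buffer.toList with hb
  set nx := next.toList with hnx
  by_cases h0 : b.length = 0
  · rw [if_pos h0, if_pos h0]
  · rw [if_neg h0, if_neg h0]
    by_cases h1 : nx.length = 0
    · rw [if_pos h1, if_pos h1]
    · rw [if_neg h1, if_neg h1]
      simp only []
      -- replace A's inner while by its characterization LL inside the fold
      have hfold :
          (List.range b.length).foldl
            (fun (acc : Nat × Nat) i =>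
              if acc.2 < aWhile (b ++ nx) b.length i (b ++ nx).length 0
              then (i, aWhile (b ++ nx) b.length i (b ++ nx).length 0) else acc) (0, 0)
          = (List.range b.length).foldl
            (fun (acc : Nat × Nat) i => if acc.2 < LL b nx i then (i, LL b nx i) else acc) (0, 0) := by
        apply PySem.List.foldl_congr_mem
        intro acc i hi
        rw [aWhile_eq b nx i h1 (List.mem_range.mp hi)]
      rw [hfold]
      obtain ⟨hp2, hpge, hplt⟩ := fold_spec (LL b nx) b.length
      have hbeq := bsearch_eq_maxR b nx
      have hP0 : PP b nx 0 := by unfold PP; simp [PySem.Chars.isIn_nil b]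
      obtain ⟨hbs1, hbs2, hbs3⟩ :=
        bsearch_spec b nx (min b.length nx.length) (min b.length nx.length + 1) 0
          (min b.length nx.length) (by omega) hP0 (Nat.zero_le _) (le_refl _)
          (fun l hl _ => hl)
      rw [hbeq] at hbs1 hbs2 hbs3
      have hRK : maxL (rr b nx) b.length ≤ min b.length nx.length := by
        apply maxL_le
        intro j hj
        have := rr_le_sub b nx j
        have := rr_le_right b nx j
        omega
      -- the two final lengths agree
      have hMeq : maxL (LL b nx) b.length =
          (if maxL (rr b nx) b.length = nx.length then nx.length - 1
           else maxL (rr b nx) b.length) := by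
        by_cases hRm : maxL (rr b nx) b.length = nx.length
        · rw [if_pos hRm]
          apply le_antisymm
          · apply maxL_le
            intro j hj
            have h := rr_le_right b nx j
            unfold LL
            split_ifs <;> omega
          · rcases maxL_attained (rr b nx) b.length with hz | ⟨i, hi, he⟩
            · omega
            · have hLi : LL b nx i = nx.length - 1 := by
                unfold LL; rw [if_pos (by omega)]
              calc nx.length - 1 = LL b nx i := hLi.symm
                _ ≤ maxL (LL b nx) b.length := maxL_ge _ _ i hi
        · rw [if_neg hRm]
          apply maxL_congr
          intro j hj
          unfold LL
          rw [if_neg (by have := maxL_ge (rr b nx) b.length j hj; omega)]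
      set R := maxL (rr b nx) b.length with hRdef
      set lv := if R = nx.length then nx.length - 1 else R with hlv
      rw [hbeq]
      have hRlv : (if R = nx.length then R - 1 else R) = lv := by
        rw [hlv]
        split_ifs with h
        · omega
        · rfl
      rw [hRlv]
      have hlvm : lv ≤ nx.length - 1 := by
        rw [hlv]; split_ifs <;> omega
      have hPl : PP b nx lv := by
        rw [hlv]
        split_ifs with hRm
        · exact PP_mono b nx (nx.length - 1) R (by omega) hbs1
        · exact hbs1
      have hfge : 0 ≤ PySem.Chars.find b (nx.take lv) := by
        rw [PySem.Chars.find_nonneg_iff]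
        exact (PySem.Chars.isIn_iff_infix _ _).mp hPl
      obtain ⟨hfs1, hfs2⟩ := PySem.Chars.find_spec hfge
      have hf1 : lv ≤ rr b nx (PySem.Chars.find b (nx.take lv)).toNat :=
        (take_prefix_iff _ _ _ (by omega)).mp hfs1
      have hf2 : ∀ j < (PySem.Chars.find b (nx.take lv)).toNat, ¬ lv ≤ rr b nx j :=
        fun j hj hc => hfs2 j hj ((take_prefix_iff _ _ _ (by omega)).mpr hc)
      -- A's recorded offset satisfies the same first-occurrence property
      have hA1 : lv ≤ rr b nx
          ((List.range b.length).foldl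
            (fun (acc : Nat × Nat) i => if acc.2 < LL b nx i then (i, LL b nx i) else acc) (0, 0)).1 := by
        apply (LL_ge_iff b nx _ lv (by omega)).mp
        rw [← hMeq, ← hp2]
        exact hpge
      have hA2 : ∀ j <
          ((List.range b.length).foldl
            (fun (acc : Nat × Nat) i => if acc.2 < LL b nx i then (i, LL b nx i) else acc) (0, 0)).1,
          ¬ lv ≤ rr b nx j := by
        intro j hj hc
        have h5 := hplt j hj
        have h6 := (LL_ge_iff b nx j lv (by omega)).mpr hc
        rw [hp2, hMeq] at h5
        omega
      have hpf : ((List.range b.length).foldl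
            (fun (acc : Nat × Nat) i => if acc.2 < LL b nx i then (i, LL b nx i) else acc) (0, 0)).1
          = (PySem.Chars.find b (nx.take lv)).toNat := by
        rcases lt_trichotomy
          ((List.range b.length).foldl
            (fun (acc : Nat × Nat) i => if acc.2 < LL b nx i then (i, LL b nx i) else acc) (0, 0)).1
          (PySem.Chars.find b (nx.take lv)).toNat with h | h | h
        · exact absurd hA1 (hf2 _ h)
        · exact h
        · exact absurd hf1 (hA2 _ h)
      have hplen : ((List.range b.length).foldl
            (fun (acc : Nat × Nat) i => if acc.2 < LL b nx i then (i, LL b nx i) else acc) (0, 0)).2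
          = lv := by rw [hp2, hMeq]
      simp only [Prod.mk.injEq]
      refine ⟨?_, ?_, ?_⟩
      · rw [hpf]
        exact Int.toNat_of_nonneg hfge
      · rw [hplen]
      · rw [hplen]
        congr 1
        rw [← List.drop_drop, List.drop_left]
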